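-- pv_equiv track=rewrite | github.com/ycm0926/Algorithm | 프로그래머스/unrated/132267. 콜라 문제/콜라 문제.py | solution
-- ===== SOURCE A (Python) =====
-- def solution(a, b, n):
--     cnt = 0                     # 마신 콜라 수
--     while n >= a:               # 병의 개수가 새 병으로 받을 수 있을 때 까지
--         n, mod = divmod(n,a)    # 새 콜라와 남은 빈병
--         n *= b                  # 받는 콜라의 개수
--         cnt += n                # 마신 콜라 개수
--         n += mod                # 총 남은 빈병
--     return cnt
-- ===== SOURCE B (Python) =====
-- def solution(a, b, n):
--     if n < a:
--         return 0
--     return (n - b) // (a - b) * b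
-- ===== Notes on version B (the rewrite author's own statement) =====
-- stated objective: simpler
-- what changed: replaced the simulation loop (repeatedly exchanging bottles until fewer than a remain) by the closed form (n-b)//(a-b)*b, with 0 for n<a
-- outside the precondition, e.g. on solution(2, -1, 10): A returns -5, B returns -3
import Mathlib
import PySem

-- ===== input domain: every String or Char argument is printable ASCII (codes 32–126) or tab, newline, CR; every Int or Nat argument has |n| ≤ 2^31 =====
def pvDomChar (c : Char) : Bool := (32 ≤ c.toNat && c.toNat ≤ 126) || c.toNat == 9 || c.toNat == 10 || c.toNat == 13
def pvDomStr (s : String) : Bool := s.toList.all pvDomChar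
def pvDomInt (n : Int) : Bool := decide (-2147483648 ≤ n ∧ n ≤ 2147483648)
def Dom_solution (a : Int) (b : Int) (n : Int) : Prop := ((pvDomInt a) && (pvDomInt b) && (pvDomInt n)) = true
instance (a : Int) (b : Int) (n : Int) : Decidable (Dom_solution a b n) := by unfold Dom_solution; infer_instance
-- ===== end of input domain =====

-- B replaces A's exchange-simulation loop by the closed form (n-b)//(a-b)*b (0 when n < a): simpler.

-- ===== PORT A =====
-- fuel makes the Python while-loop total; inside Pre_ the loop state n strictly
-- decreases and stays ≥ 0, so fuel n.toNat + 1 never runs out there.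
def solutionLoop (a : Int) (b : Int) : Nat → Int → Int → Int
  | 0, _, cnt => cnt
  | fuel + 1, n, cnt =>
    if n ≥ a then
      match PySem.Int.divmod? n a with
      | none => cnt              -- a = 0: Python raises ZeroDivisionError; outside Pre_
      | some (q, mod) =>
        let n1 := q * b          -- n *= b
        let cnt1 := cnt + n1     -- cnt += n
        let n2 := n1 + mod       -- n += mod
        solutionLoop a b fuel n2 cnt1
    else cnt

def solution (a : Int) (b : Int) (n : Int) : Int :=
  solutionLoop a b (n.toNat + 1) n 0

-- ===== PORT B =====
def solution_alt (a : Int) (b : Int) (n : Int) : Int :=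
  if n < a then 0 else PySem.Int.floordiv (n - b) (a - b) * b

-- ===== PRECONDITION & SPEC =====
-- Pre_ restricts to the cola problem's natural domain 0 ≤ b < a (or the trivial case
-- n < a, where no exchange happens); it excludes negative b with n ≥ a, outside the
-- problem's domain, where A still returns a (negative) count, and b ≥ a with n ≥ a,
-- where A's loop never terminates.
def Pre_solution (a : Int) (b : Int) (n : Int) : Prop := (0 ≤ b ∧ b < a) ∨ n < a
instance (a : Int) (b : Int) (n : Int) : Decidable (Pre_solution a b n) := by unfold Pre_solution; infer_instance
def pvWitness_solution : Int × Int × Int := (3, 1, 20)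
def Spec_solution (a : Int) (b : Int) (n : Int) (out : Int) : Prop := out = solution_alt a b n
instance (a : Int) (b : Int) (n : Int) (out : Int) : Decidable (Spec_solution a b n out) := by unfold Spec_solution; infer_instance

-- ===== CLAIM (what is proved, stated in full; the proofs are below) =====
def Claim_equal_solution : Prop := ∀ (a : Int) (b : Int) (n : Int), Dom_solution a b n → Pre_solution a b n → Spec_solution a b n (solution a b n)

-- ===== LEMMAS AND PROOFS =====

-- Loop invariant: with 0 ≤ b < a and b ≤ n and enough fuel, the loop adds the closed form.
lemma solutionLoop_closed (a b : Int) (hb : 0 ≤ b) (hba : b < a) :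
    ∀ (fuel : Nat) (n cnt : Int), b ≤ n → n.toNat < fuel →
      solutionLoop a b fuel n cnt = cnt + (n - b) / (a - b) * b := by
  intro fuel
  induction fuel with
  | zero => intro n cnt _ h; omega
  | succ fuel ih =>
    intro n cnt hbn hfuel
    by_cases hna : n ≥ a
    · have ha0 : a ≠ 0 := by omega
      have hapos : 0 < a := by omega
      have hdm : PySem.Int.divmod? n a = some (n / a, n % a) := by
        have h1 : PySem.Int.floordiv n a = n / a := PySem.Int.floordiv_eq_ediv_of_pos hapos
        have h2 : PySem.Int.mod n a = n % a := PySem.Int.mod_eq_emod_of_pos hapos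
        simp only [PySem.Int.divmod?, ha0, if_false]
        simp only [PySem.Int.floordiv, PySem.Int.mod] at h1 h2
        simp [h1, h2]
      have hq1 : 1 ≤ n / a := (Int.le_ediv_iff_mul_le hapos).mpr (by omega)
      have hmod0 : 0 ≤ n % a := Int.emod_nonneg n ha0
      have hmodlt : n % a < a := Int.emod_lt_of_pos n hapos
      -- the new bottle count
      set q := n / a with hqdef
      have hrec : q * a + n % a = n := by rw [hqdef, mul_comm]; exact Int.mul_ediv_add_emod n a
      have hb2 : b ≤ q * b + n % a := by nlinarith
      have hdec : q * b + n % a < n := by nlinarith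
      have hfuel2 : (q * b + n % a).toNat < fuel := by omega
      have hdiv : (n - b) / (a - b) = (q * b + n % a - b) / (a - b) + q := by
        have hne : a - b ≠ 0 := by omega
        have h1 : n - b = (q * b + n % a - b) + q * (a - b) := by nlinarith [hrec]
        rw [h1, Int.add_mul_ediv_right _ _ hne]
      simp only [solutionLoop, hna, if_pos, hdm]
      rw [ih (q * b + n % a) (cnt + q * b) hb2 hfuel2, hdiv]
      ring
    · have h0 : (n - b) / (a - b) = 0 :=
        Int.ediv_eq_zero_of_lt (by omega) (by omega)
      simp [solutionLoop, hna, h0]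

-- ===== VERDICT (by name: the statement is the Claim_ definition above) =====
theorem solution_spec : Claim_equal_solution := by
  intro a b n _ hpre
  unfold Spec_solution solution solution_alt
  by_cases hna : n < a
  · simp [solutionLoop, not_le.mpr hna]
  · push_neg at hna
    have hb : 0 ≤ b ∧ b < a := by
      rcases hpre with h | h
      · exact h
      · omega
    rw [solutionLoop_closed a b hb.1 hb.2 (n.toNat + 1) n 0 (by omega) (by omega)]
    rw [if_neg (by omega), PySem.Int.floordiv_eq_ediv_of_pos (by omega)]
    ring
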